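-- pv_equiv track=rewrite | github.com/anarkia7115/google-foobar | bunny_prisoner_locating.py | answer
-- ===== SOURCE A (Python) =====
-- def answer(x, y):
--     height_start = x + y - 1
--     width_step = x - 1
--     start_num = 0
--     for i in range(1, height_start):  # final but last level
--         start_num += i
--
--     start_num += 1  # goto final level
--
--     return str(start_num + width_step)
-- ===== SOURCE B (Python) =====
-- def answer(x, y):
--     n = max(x + y - 2, 0)
--     return str(n * (n + 1) // 2 + x)
-- ===== Notes on version B (the rewrite author's own statement) =====
-- stated objective: faster
-- what changed: replaces the O(x+y) summation loop by the closed-form triangular number n*(n+1)//2 with n = max(x+y-2, 0)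
import Mathlib
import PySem

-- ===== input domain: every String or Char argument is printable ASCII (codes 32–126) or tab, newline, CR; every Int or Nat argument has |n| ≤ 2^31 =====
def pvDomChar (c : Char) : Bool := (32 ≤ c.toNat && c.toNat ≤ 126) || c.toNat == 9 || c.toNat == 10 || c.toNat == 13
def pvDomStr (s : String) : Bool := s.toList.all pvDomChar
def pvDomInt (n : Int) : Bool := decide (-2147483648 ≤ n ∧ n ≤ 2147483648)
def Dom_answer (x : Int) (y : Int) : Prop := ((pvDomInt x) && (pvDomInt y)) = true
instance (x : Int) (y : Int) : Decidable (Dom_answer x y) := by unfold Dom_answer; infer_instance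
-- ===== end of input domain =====

-- B replaces A's O(x+y) summation loop by the closed-form triangular number (objective: faster, asymptotic).

-- ===== PORT A =====
def answer (x : Int) (y : Int) : String :=
  let height_start := x + y - 1
  let width_step := x - 1
  let start_num : Int := 0
  let start_num := (PySem.List.pyRange 1 height_start 1).foldl (fun acc i => acc + i) start_num
  let start_num := start_num + 1
  PySem.Int.toStr (start_num + width_step)

-- ===== PORT B =====
def answer_alt (x : Int) (y : Int) : String :=
  let n := max (x + y - 2) 0
  PySem.Int.toStr (PySem.Int.floordiv (n * (n + 1)) 2 + x)

-- ===== PRECONDITION & SPEC =====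
def Spec_answer (x : Int) (y : Int) (out : String) : Prop := out = answer_alt x y
instance (x : Int) (y : Int) (out : String) : Decidable (Spec_answer x y out) := by unfold Spec_answer; infer_instance

-- ===== CLAIM (what is proved, stated in full; the proofs are below) =====
def Claim_equal_answer : Prop := ∀ (x : Int) (y : Int), Dom_answer x y → Spec_answer x y (answer x y)

-- ===== LEMMAS AND PROOFS =====
lemma sum_pyRange_two_mul (m : Nat) :
    ((PySem.List.pyRange 1 (1 + (m : Int)) 1).foldl (fun acc i => acc + i) 0) * 2
      = (m : Int) * ((m : Int) + 1) := by
  induction m with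
  | zero =>
    rw [show (1:Int) + (0:Nat) = 1 by norm_num, PySem.List.pyRange_one_eq_nil le_rfl]
    simp
  | succ k ih =>
    have h1 : (1 : Int) ≤ 1 + (k : Int) := by omega
    have hcast : (1 : Int) + ((k + 1 : Nat) : Int) = (1 + (k : Int)) + 1 := by push_cast; ring
    rw [hcast, PySem.List.pyRange_one_succ_right h1, List.foldl_append]
    simp only [List.foldl_cons, List.foldl_nil]
    push_cast
    linear_combination ih

-- ===== VERDICT (by name: the statement is the Claim_ definition above) =====
theorem answer_spec : Claim_equal_answer := by
  intro x y _
  show answer x y = answer_alt x y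
  simp only [answer, answer_alt]
  set n : Int := max (x + y - 2) 0 with hn
  have hn0 : 0 ≤ n := le_max_right _ _
  have hrange : PySem.List.pyRange 1 (x + y - 1) 1 = PySem.List.pyRange 1 (1 + n) 1 := by
    by_cases h : 1 ≤ x + y - 1
    · have : x + y - 1 = 1 + n := by omega
      rw [this]
    · rw [PySem.List.pyRange_one_eq_nil (by omega),
          PySem.List.pyRange_one_eq_nil (by omega)]
  have hsum := sum_pyRange_two_mul n.toNat
  rw [Int.toNat_of_nonneg hn0] at hsum
  rw [hrange, PySem.Int.floordiv_eq_ediv_of_pos (by omega)]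
  congr 1
  set t := n * (n + 1) with ht
  omega
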